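-- pv_equiv track=rewrite | github.com/Dara-PP/Gemimg | src/dna_graph/codec/encode_decode.py | convert_message_to_bases
-- ===== SOURCE A (Python) =====
-- def convert_message_to_bases(message):
--     """
--     Convertit un message en une liste de bases.
--     Chaque caractère est encodé en 4 bases en convertissant sa valeur ASCII en base 4.
--
--     Exemple :
--       'h' (ASCII 104) en base 4 → [1,2,2,0] → ["C", "G", "G", "A"]
--     """
--     bases = []
--     mapping = {0: "A", 1: "C", 2: "G", 3: "T"}
--     for char in message:
--         ascii_val = ord(char)
--         # Conversion en base 4 sur 4 chiffres
--         digits = []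
--         for _ in range(4):
--             digits.append(ascii_val % 4)
--             ascii_val //= 4
--         digits = digits[::-1]  # pour remettre dans l'ordre
--         for d in digits:
--             bases.append(mapping[d])
--     return bases
-- ===== SOURCE B (Python) =====
-- _ACGT = ["A", "C", "G", "T"]
-- # 256-entry table: byte value -> its 4 DNA bases, digits read off by bit shifts
-- _TABLE = [[_ACGT[(v >> 6) & 3], _ACGT[(v >> 4) & 3], _ACGT[(v >> 2) & 3], _ACGT[v & 3]]
--           for v in range(256)]
--
-- def convert_message_to_bases(message):
--     out = []
--     for char in message:
--         out.extend(_TABLE[ord(char) & 0xFF])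
--     return out
-- ===== Notes on version B (the rewrite author's own statement) =====
-- stated objective: faster
-- what changed: B precomputes a 256-entry byte-to-4-bases table once (digits read off with bit shifts) and does one flat pass extending the output with table[ord(c) & 0xFF], removing A's per-character digit-extraction loop, reversal and dict lookups.
import Mathlib
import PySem

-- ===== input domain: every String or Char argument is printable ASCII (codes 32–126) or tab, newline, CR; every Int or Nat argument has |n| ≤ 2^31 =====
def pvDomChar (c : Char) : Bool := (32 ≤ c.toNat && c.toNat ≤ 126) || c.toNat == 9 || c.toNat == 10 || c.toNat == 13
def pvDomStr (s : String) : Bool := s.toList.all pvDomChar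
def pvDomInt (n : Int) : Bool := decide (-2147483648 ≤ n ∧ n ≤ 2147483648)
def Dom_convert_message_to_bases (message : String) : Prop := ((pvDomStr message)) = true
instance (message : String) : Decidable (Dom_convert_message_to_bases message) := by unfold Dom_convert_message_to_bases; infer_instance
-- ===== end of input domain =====

-- B replaces A's per-character digit-extraction/reversal/dict loop by a 256-entry table built once
-- (bit shifts) and one flat pass; return value only, measured as a constant-factor speedup.

-- ===== PORT A =====
def pvMapping : PySem.Dict Int String :=
  PySem.Dict.ofList [(0, "A"), (1, "C"), (2, "G"), (3, "T")]

def convert_message_to_bases (message : String) : List String :=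
  message.toList.foldl
    (fun bases char =>
      let ascii_val : Int := (char.toNat : Int)
      -- for _ in range(4): digits.append(ascii_val % 4); ascii_val //= 4
      let st := (PySem.List.pyRange 0 4 1).foldl
        (fun (st : List Int × Int) _ =>
          (st.1 ++ [PySem.Int.mod st.2 4], PySem.Int.floordiv st.2 4))
        (([] : List Int), ascii_val)
      -- digits = digits[::-1]  (step -1 is never 0, so getD is never taken)
      let digits := (PySem.List.slice? st.1 none none (-1)).getD []
      -- mapping[d]: digits are 0..3 so the KeyError branch is unreachable; getD is exact here
      digits.foldl (fun b d => b ++ [(pvMapping.get? d).getD ""]) bases)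
    []

-- ===== PORT B =====
def pvACGT : List String := ["A", "C", "G", "T"]

def pvTable : List (List String) :=
  (List.range 256).map (fun v =>
    [pvACGT.getD ((v >>> 6) &&& 3) "", pvACGT.getD ((v >>> 4) &&& 3) "",
     pvACGT.getD ((v >>> 2) &&& 3) "", pvACGT.getD (v &&& 3) ""])

def convert_message_to_bases_alt (message : String) : List String :=
  message.toList.foldl
    (fun out char => out ++ pvTable.getD (char.toNat &&& 255) []) []

-- ===== PRECONDITION & SPEC =====
def Spec_convert_message_to_bases (message : String) (out : List String) : Prop := out = convert_message_to_bases_alt message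
instance (message : String) (out : List String) : Decidable (Spec_convert_message_to_bases message out) := by unfold Spec_convert_message_to_bases; infer_instance

-- ===== CLAIM (what is proved, stated in full; the proofs are below) =====
def Claim_equal_convert_message_to_bases : Prop := ∀ (message : String), Dom_convert_message_to_bases message → Spec_convert_message_to_bases message (convert_message_to_bases message)

-- ===== LEMMAS AND PROOFS =====

-- A's per-character contribution, as a function of the character code
def pvPerA (n : Nat) : List String :=
  let st := (PySem.List.pyRange 0 4 1).foldl
    (fun (st : List Int × Int) _ =>
      (st.1 ++ [PySem.Int.mod st.2 4], PySem.Int.floordiv st.2 4))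
    (([] : List Int), (n : Int))
  (((PySem.List.slice? st.1 none none (-1)).getD []).map
    (fun d => (pvMapping.get? d).getD ""))

set_option maxRecDepth 4096 in
lemma perA_eq_table : ∀ v ∈ List.range 256, pvPerA v = pvTable.getD (v &&& 255) [] := by
  decide

lemma convA_eq_flatMap (message : String) :
    convert_message_to_bases message = message.toList.flatMap (fun c => pvPerA c.toNat) := by
  unfold convert_message_to_bases
  have h : (fun (bases : List String) (char : Char) =>
      let ascii_val : Int := (char.toNat : Int)
      let st := (PySem.List.pyRange 0 4 1).foldl
        (fun (st : List Int × Int) _ =>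
          (st.1 ++ [PySem.Int.mod st.2 4], PySem.Int.floordiv st.2 4))
        (([] : List Int), ascii_val)
      let digits := (PySem.List.slice? st.1 none none (-1)).getD []
      digits.foldl (fun b d => b ++ [(pvMapping.get? d).getD ""]) bases)
      = fun bases char => bases ++ pvPerA char.toNat := by
    funext bases char
    simp only [pvPerA, PySem.List.foldl_append_singleton_eq_map]
  rw [h, PySem.List.foldl_append_eq_flatMap]
  simp

lemma convB_eq_flatMap (message : String) :
    convert_message_to_bases_alt message
      = message.toList.flatMap (fun c => pvTable.getD (c.toNat &&& 255) []) := by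
  unfold convert_message_to_bases_alt
  rw [PySem.List.foldl_append_eq_flatMap]
  simp

-- ===== VERDICT (by name: the statement is the Claim_ definition above) =====
theorem convert_message_to_bases_spec : Claim_equal_convert_message_to_bases := by
  intro message hdom
  unfold Spec_convert_message_to_bases
  rw [convA_eq_flatMap, convB_eq_flatMap]
  apply List.flatMap_congr
  intro c hc
  have hdc : pvDomChar c = true := by
    have := List.all_eq_true.1 hdom c hc
    simpa using this
  have hlt : c.toNat < 256 := by
    simp [pvDomChar] at hdc
    omega
  exact perA_eq_table c.toNat (List.mem_range.2 hlt)
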